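-- pv_equiv track=rewrite | github.com/yukikongju/LeetCodeTraining | Calculum/Semaine13/birds_wire.py | solve
-- ===== SOURCE A (Python) =====
-- def solve(l, d, n, positions):
--     if n == 0:
--         return (l-12)//d + 1
--
--     # sort
--     positions.sort()
--     right_border = l - 6
--
--     # count number of birds in each intervals
--     total = 0
--     current = 6
--     for position in positions:
--         while (position - current >= d):
--             current += d
--             total += 1
--         current += d
--
--     while current < (l-6):
--         current += d
--         total += 1
--
--     return total
-- ===== SOURCE B (Python) =====
-- def solve(l, d, n, positions):
--     if n == 0:
--         return (l - 12) // d + 1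
--     total = 0
--     current = 6
--     for position in sorted(positions):
--         k = (position - current) // d
--         if k > 0:
--             total += k
--             current += k * d
--         current += d
--     remaining = l - 6 - current
--     if remaining > 0:
--         total += (remaining + d - 1) // d
--     return total
-- ===== Notes on version B (the rewrite author's own statement) =====
-- stated objective: faster
-- what changed: Both per-position while loops and the trailing while loop of A are replaced by closed-form floor/ceiling integer divisions, so B does O(1) arithmetic per position instead of stepping the cursor d by d.
-- outside the precondition, e.g. on solve(0, 0, 1, [0]): A returns 0, B raises ZeroDivisionError; on solve(0, -2, 1, [0]): A returns 0, B returns 3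
import Mathlib
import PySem

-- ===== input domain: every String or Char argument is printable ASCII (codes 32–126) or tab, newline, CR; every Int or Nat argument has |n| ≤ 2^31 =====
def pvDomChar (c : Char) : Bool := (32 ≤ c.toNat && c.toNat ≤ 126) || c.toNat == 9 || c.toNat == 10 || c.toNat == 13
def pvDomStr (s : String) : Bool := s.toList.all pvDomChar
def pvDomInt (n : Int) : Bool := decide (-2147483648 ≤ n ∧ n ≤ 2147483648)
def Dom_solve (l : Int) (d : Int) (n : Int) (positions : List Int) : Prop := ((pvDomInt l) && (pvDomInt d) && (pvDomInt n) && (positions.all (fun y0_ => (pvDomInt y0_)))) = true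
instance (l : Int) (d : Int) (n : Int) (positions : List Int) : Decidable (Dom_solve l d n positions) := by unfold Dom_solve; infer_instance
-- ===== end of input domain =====

-- B replaces A's two per-step while loops by closed-form floor/ceil divisions (asymptotically
-- faster when l/d is large). Equivalence is about the RETURN value only: A sorts `positions`
-- in place, B does not mutate its argument.

-- ===== PORT A =====
-- A's inner `while position - current >= d` loop; the `0 < d` conjunct only makes the
-- recursion terminate (for d ≤ 0 the Python loop diverges; Pre_solve excludes that).
def solveInnerA (d position : Int) (current total : Int) : Int × Int :=
  if h : d ≤ position - current ∧ 0 < d then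
    solveInnerA d position (current + d) (total + 1)
  else (current, total)
termination_by (position - current).toNat
decreasing_by
  obtain ⟨h1, h2⟩ := h
  omega

-- A's final `while current < l - 6` loop, same termination guard.
def solveFinalA (d bound : Int) (current total : Int) : Int :=
  if h : current < bound ∧ 0 < d then
    solveFinalA d bound (current + d) (total + 1)
  else total
termination_by (bound - current).toNat
decreasing_by
  obtain ⟨h1, h2⟩ := h
  omega

def solve (l : Int) (d : Int) (n : Int) (positions : List Int) : Int :=
  if n == 0 then (l - 12).fdiv d + 1
  else
    let sortedPositions := PySem.List.sorted positions (fun x => x) false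
    let st := sortedPositions.foldl
      (fun (st : Int × Int) position =>
        let r := solveInnerA d position st.1 st.2
        (r.1 + d, r.2))
      (6, 0)
    solveFinalA d (l - 6) st.1 st.2

-- ===== PORT B =====
def solve_alt (l : Int) (d : Int) (n : Int) (positions : List Int) : Int :=
  if n == 0 then (l - 12).fdiv d + 1
  else
    let st := (PySem.List.sorted positions (fun x => x) false).foldl
      (fun (st : Int × Int) position =>
        let k := (position - st.1).fdiv d
        let st' := if k > 0 then (st.1 + k * d, st.2 + k) else st
        (st'.1 + d, st'.2))
      (6, 0)
    let remaining := l - 6 - st.1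
    if remaining > 0 then st.2 + (remaining + d - 1).fdiv d else st.2

-- ===== PRECONDITION & SPEC =====
-- Pre_solve excludes d ≤ 0: there Python A raises ZeroDivisionError (n == 0, d == 0) or loops
-- forever, except on degenerate inputs where no loop body ever runs and A returns; B's
-- divisions raise ZeroDivisionError on such inputs when d == 0.
def Pre_solve (l : Int) (d : Int) (n : Int) (positions : List Int) : Prop := 1 ≤ d
instance (l : Int) (d : Int) (n : Int) (positions : List Int) : Decidable (Pre_solve l d n positions) := by unfold Pre_solve; infer_instance
def pvWitness_solve : Int × Int × Int × List Int := (30, 4, 2, [7, 20])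

def Spec_solve (l : Int) (d : Int) (n : Int) (positions : List Int) (out : Int) : Prop := out = solve_alt l d n positions
instance (l : Int) (d : Int) (n : Int) (positions : List Int) (out : Int) : Decidable (Spec_solve l d n positions out) := by unfold Spec_solve; infer_instance

-- ===== CLAIM (what is proved, stated in full; the proofs are below) =====
def Claim_equal_solve : Prop := ∀ (l : Int) (d : Int) (n : Int) (positions : List Int), Dom_solve l d n positions → Pre_solve l d n positions → Spec_solve l d n positions (solve l d n positions)

-- ===== LEMMAS AND PROOFS =====

theorem fdiv_pos_eq_ediv (a b : Int) (hb : 0 < b) : a.fdiv b = a / b := by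
  rw [Int.fdiv_eq_ediv]
  simp [Int.le_of_lt hb]

-- A's inner while loop equals the clamped floor-division count.
theorem solveInnerA_eq (d position current total : Int) (hd : 0 < d) :
    solveInnerA d position current total =
      (current + max ((position - current) / d) 0 * d,
       total + max ((position - current) / d) 0) := by
  rw [solveInnerA]
  by_cases h : d ≤ position - current
  · rw [dif_pos ⟨h, hd⟩]
    rw [solveInnerA_eq d position (current + d) (total + 1) hd]
    have hstep : (position - (current + d)) / d = (position - current) / d - 1 := by
      have := Int.add_mul_ediv_right (position - current) (-1) (by omega : d ≠ 0)
      have heq : position - (current + d) = position - current + (-1) * d := by ring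
      rw [heq, this]; ring
    have hge1 : 1 ≤ (position - current) / d := by
      have := Int.ediv_le_ediv hd h
      simpa [Int.ediv_self (by omega : d ≠ 0)] using this
    have hm1 : max ((position - current) / d - 1) 0 = (position - current) / d - 1 :=
      max_eq_left (by omega)
    have hm2 : max ((position - current) / d) 0 = (position - current) / d :=
      max_eq_left (by omega)
    rw [hstep, hm1, hm2]
    simp only [Prod.mk.injEq]
    constructor <;> ring
  · rw [dif_neg (by tauto)]
    have hle : (position - current) / d ≤ 0 := by
      have h1 : position - current ≤ d - 1 := by omega
      have h2 := Int.ediv_le_ediv hd h1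
      have h3 : (d - 1) / d = 0 := Int.ediv_eq_zero_of_lt (by omega) (by omega)
      omega
    simp [max_eq_right hle]
termination_by (position - current).toNat
decreasing_by omega

-- A's final while loop equals the ceiling-division count.
theorem solveFinalA_eq (d bound current total : Int) (hd : 0 < d) :
    solveFinalA d bound current total =
      if bound - current > 0 then total + (bound - current + d - 1) / d else total := by
  rw [solveFinalA]
  by_cases h : current < bound
  · rw [dif_pos ⟨h, hd⟩]
    rw [solveFinalA_eq d bound (current + d) (total + 1) hd]
    have hsplit : (bound - current + d - 1) / d = (bound - current - 1) / d + 1 := by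
      have := Int.add_mul_ediv_right (bound - current - 1) 1 (by omega : d ≠ 0)
      have heq : bound - current + d - 1 = bound - current - 1 + 1 * d := by ring
      rw [heq, this]
    by_cases h2 : bound - (current + d) > 0
    · rw [if_pos h2, if_pos (by omega)]
      have heq : bound - (current + d) + d - 1 = bound - current - 1 := by ring
      rw [heq, hsplit]
      ring
    · rw [if_neg h2, if_pos (by omega)]
      have hz : (bound - current - 1) / d = 0 :=
        Int.ediv_eq_zero_of_lt (by omega) (by omega)
      rw [hsplit, hz]
      ring
  · rw [dif_neg (by tauto)]
    rw [if_neg (by omega)]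
termination_by (bound - current).toNat
decreasing_by omega

-- ===== VERDICT (by name: the statement is the Claim_ definition above) =====
theorem solve_spec : Claim_equal_solve := by
  intro l d n positions _hdom hpre
  unfold Spec_solve solve solve_alt
  have hd : 0 < d := hpre
  by_cases hn : n == 0
  · simp [hn]
  · simp only [hn, Bool.false_eq_true, if_false]
    have hfold : ∀ (st : Int × Int) position,
        (let r := solveInnerA d position st.1 st.2; (r.1 + d, r.2)) =
        (let k := (position - st.1).fdiv d;
         let st' := if k > 0 then (st.1 + k * d, st.2 + k) else st;
         (st'.1 + d, st'.2)) := by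
      intro st position
      simp only [solveInnerA_eq d position st.1 st.2 hd, fdiv_pos_eq_ediv _ _ hd]
      by_cases hk : (position - st.1) / d > 0
      · simp [hk, max_eq_left (le_of_lt hk)]
      · simp [hk, max_eq_right (by omega : (position - st.1) / d ≤ 0)]
    have hfoldeq :
        (PySem.List.sorted positions (fun x => x) false).foldl
          (fun (st : Int × Int) position =>
            let r := solveInnerA d position st.1 st.2
            (r.1 + d, r.2)) (6, 0) =
        (PySem.List.sorted positions (fun x => x) false).foldl
          (fun (st : Int × Int) position =>
            let k := (position - st.1).fdiv d
            let st' := if k > 0 then (st.1 + k * d, st.2 + k) else st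
            (st'.1 + d, st'.2)) (6, 0) := by
      apply PySem.List.foldl_congr_mem
      intro st position _
      exact hfold st position
    simp only [hfoldeq]
    rw [solveFinalA_eq _ _ _ _ hd, fdiv_pos_eq_ediv _ _ hd]
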